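-- pv_equiv track=rewrite | github.com/sbarczyk/WDI | Kolokwia/poprawkowe/21_22/Kolokwium_2/zad_2.py | komnaty
-- ===== SOURCE A (Python) =====
-- from math import isqrt
--
-- def is_prime(x):
--
--     if x == 2 or x == 3:
--         return True
--     if x <= 1 or x % 2 == 0 or x % 3 == 0:
--         return False
--     for i in range(6, isqrt(x) + 1, 6):
--         if x % (i-1) == 0 or x % (i+1) == 0:
--             return False
--     return True
--
-- def komnaty(T):
--
--     def rek(i, sztabki):
--         if i == len(T) - 1:
--             if T[i] + sztabki <= 100 and is_prime(T[i] + sztabki):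
--                 return True
--             return False
--
--         # x - ilość sztabek, które ZOSTAWIAMY w i-tej komnacie
--         for x in range(sztabki - 6, sztabki +1):
--             if T[i] + x <= 100 and is_prime(T[i] + x):
--                 if rek(i+1, sztabki - x):
--                     return True
--         return False
--
--     return rek(0, 0)
-- ===== SOURCE B (Python) =====
-- from math import isqrt
--
-- def is_prime(x):
--
--     if x == 2 or x == 3:
--         return True
--     if x <= 1 or x % 2 == 0 or x % 3 == 0:
--         return False
--     for i in range(6, isqrt(x) + 1, 6):
--         if x % (i-1) == 0 or x % (i+1) == 0:
--             return False
--     return True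
--
-- def komnaty(T):
--     # One left-to-right pass maintaining the set of bar counts that can be
--     # carried into the next room (always a subset of 0..6), instead of
--     # branching over every way of leaving bars in every room.
--     def good(v):
--         return v <= 100 and is_prime(v)
--     *init, last = T
--     reach = [0]
--     for t in init:
--         reach = [c for c in range(7) if any(good(t + s - c) for s in reach)]
--     return any(good(last + s) for s in reach)
-- ===== Notes on version B (the rewrite author's own statement) =====
-- stated objective: alternative
-- what changed: Keeps the module's is_prime helper unchanged and replaces the branching recursion over all ways of leaving bars by a single left-to-right pass maintaining the set of reachable carry values, which always lies within 0..6.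
import Mathlib
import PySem

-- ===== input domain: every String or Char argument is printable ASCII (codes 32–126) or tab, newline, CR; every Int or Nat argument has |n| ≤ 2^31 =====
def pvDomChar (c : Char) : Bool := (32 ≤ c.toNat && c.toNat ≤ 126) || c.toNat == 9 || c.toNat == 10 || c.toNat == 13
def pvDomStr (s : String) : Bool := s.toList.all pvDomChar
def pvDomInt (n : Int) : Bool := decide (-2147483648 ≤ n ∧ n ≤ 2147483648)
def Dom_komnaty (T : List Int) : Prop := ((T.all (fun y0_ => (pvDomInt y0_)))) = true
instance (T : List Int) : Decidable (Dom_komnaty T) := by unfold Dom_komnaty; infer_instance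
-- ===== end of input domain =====

-- B keeps the module's is_prime helper unchanged and replaces the branching recursion
-- by one left-to-right pass over the set of reachable carry values (always in 0..6).

-- ===== PORT A =====
-- math.isqrt ported by hand (exact on Nat: the largest k with k*k ≤ n); is_prime
-- only applies it to x ≥ 4 (earlier branches return first), where this is exact.
def isqrtP (n : Nat) : Nat := (List.range (n + 1)).foldl (fun a k => if k * k ≤ n then k else a) 0

-- is_prime, the module helper shared by Source A and Source B (the for-with-early-return loop = any)
def isPrimeA (x : Int) : Bool :=
  if x = 2 ∨ x = 3 then true
  else if x ≤ 1 ∨ x % 2 = 0 ∨ x % 3 = 0 then false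
  else !((PySem.List.pyRange 6 ((isqrtP x.toNat : Nat) + 1) 6).any
          (fun i => x % (i - 1) == 0 || x % (i + 1) == 0))

-- rek(i, sztabki), recursion on the suffix T[i:]; the [] case is unreachable from
-- komnaty on nonempty T (on empty T Python raises IndexError, excluded by Pre_).
def rekA : List Int → Int → Bool
  | [], _ => false
  | [t], sz => decide (t + sz ≤ 100) && isPrimeA (t + sz)
  | t :: u :: rest, sz =>
      (PySem.List.pyRange (sz - 6) (sz + 1) 1).any
        (fun x => (decide (t + x ≤ 100) && isPrimeA (t + x)) && rekA (u :: rest) (sz - x))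

def komnaty (T : List Int) : Bool := rekA T 0

-- ===== PORT B =====
-- good(v) from Source B (calling the shared is_prime helper above)
def goodB (v : Int) : Bool := decide (v ≤ 100) && isPrimeA v

-- one step of Source B's comprehension: the carries reachable after room t
def stepB (S : List Int) (t : Int) : List Int :=
  (PySem.List.pyRange 0 7 1).filter (fun c => S.any (fun s => goodB (t + s - c)))

-- `*init, last = T` raises on empty T (excluded by Pre_); the none branch is unreachable there
def komnaty_alt (T : List Int) : Bool :=
  match T.getLast? with
  | none => false
  | some last => (T.dropLast.foldl stepB [0]).any (fun s => goodB (last + s))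

-- ===== PRECONDITION & SPEC =====
-- Pre_ excludes only the empty list, on which both Pythons raise (IndexError / unpacking ValueError)
def Pre_komnaty (T : List Int) : Prop := T ≠ []
instance (T : List Int) : Decidable (Pre_komnaty T) := by unfold Pre_komnaty; infer_instance
def pvWitness_komnaty : List Int := [5, 90]

def Spec_komnaty (T : List Int) (out : Bool) : Prop := out = komnaty_alt T
instance (T : List Int) (out : Bool) : Decidable (Spec_komnaty T out) := by unfold Spec_komnaty; infer_instance

-- ===== CLAIM (what is proved, stated in full; the proofs are below) =====
def Claim_equal_komnaty : Prop := ∀ (T : List Int), Dom_komnaty T → Pre_komnaty T → Spec_komnaty T (komnaty T)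

-- ===== LEMMAS AND PROOFS =====

-- loop invariant: folding stepB over the prefix tracks exactly the set of carries from
-- which A's recursion on the remaining suffix (ending in `last`) can still succeed
theorem rek_eq_fold (last : Int) :
    ∀ (L S : List Int),
      S.any (fun s => rekA (L ++ [last]) s) =
        (L.foldl stepB S).any (fun s => goodB (last + s)) := by
  intro L
  induction L with
  | nil =>
      intro S
      simp only [List.nil_append, List.foldl_nil]
      have : (fun s => rekA [last] s) = (fun s => goodB (last + s)) := by
        funext s
        show (decide (last + s ≤ 100) && isPrimeA (last + s)) = goodB (last + s)
        rfl
      rw [this]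
  | cons t L' ih =>
      intro S
      obtain ⟨u, rest, h⟩ : ∃ u rest, L' ++ [last] = u :: rest := by
        cases L' <;> exact ⟨_, _, rfl⟩
      have unfoldA : ∀ sz, rekA (t :: (L' ++ [last])) sz =
          (PySem.List.pyRange (sz - 6) (sz + 1) 1).any
            (fun x => (decide (t + x ≤ 100) && isPrimeA (t + x)) && rekA (L' ++ [last]) (sz - x)) := by
        intro sz; rw [h]; simp [rekA]
      rw [List.foldl_cons, ← ih (stepB S t)]
      simp only [List.cons_append, unfoldA]
      rw [Bool.eq_iff_iff]
      simp only [List.any_eq_true, stepB, List.mem_filter, PySem.List.mem_pyRange_one,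
        Bool.and_eq_true, goodB]
      constructor
      · rintro ⟨s, hs, x, ⟨hx1, hx2⟩, hgood, hrek⟩
        refine ⟨s - x, ⟨⟨by omega, by omega⟩, ⟨s, hs, ?_⟩⟩, ?_⟩
        · have e : t + s - (s - x) = t + x := by ring
          rw [e]; exact hgood
        · exact hrek
      · rintro ⟨c, ⟨⟨hc0, hc7⟩, s, hs, hgood⟩, hrek⟩
        refine ⟨s, hs, s - c, ⟨by omega, by omega⟩, ?_, ?_⟩
        · have e : t + (s - c) = t + s - c := by ring
          rw [e]; exact hgood
        · have e : s - (s - c) = c := by ring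
          rw [e]; exact hrek

-- ===== VERDICT (by name: the statement is the Claim_ definition above) =====
theorem komnaty_spec : Claim_equal_komnaty := by
  intro T _ hpre
  unfold Spec_komnaty komnaty komnaty_alt
  rw [List.getLast?_eq_some_getLast hpre]
  have h : T.dropLast ++ [T.getLast hpre] = T := List.dropLast_append_getLast hpre
  have key := rek_eq_fold (T.getLast hpre) T.dropLast [0]
  rw [h] at key
  simpa using key
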